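-- pv_equiv track=rewrite | github.com/Valokoodari/advent-of-code | 2024/solutions/day_15.py | parse
-- ===== SOURCE A (Python) =====
-- def parse(data, p = 1):
--     ms, ins = data.split("\n\n")
--     ms, ws, bs, pr, pc = ms.splitlines(), [], [], 0, 0
--     for r in range(len(ms)):
--         for c in range(len(ms[0])):
--             if ms[r][c] == "#":
--                 ws.append((r, c*p))
--                 if p == 2:
--                     ws.append((r, c*p+1))
--             elif ms[r][c] == "O":
--                 bs.append((r, c*p))
--             elif ms[r][c] == "@":
--                 pr, pc = r, c*p
--     return ins, ws, bs, pr, pc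
-- ===== SOURCE B (Python) =====
-- def parse(data, p=1):
--     ms, ins = data.split("\n\n")
--     g = ms.splitlines()
--     w = len(g[0]) if g else 0
--     ws = [(r, c * p + k)
--           for r, row in enumerate(g)
--           for c in range(w) if row[c] == "#"
--           for k in range(2 if p == 2 else 1)]
--     bs = [(r, c * p) for r, row in enumerate(g) for c in range(w) if row[c] == "O"]
--     pr, pc = 0, 0
--     for r, row in enumerate(g):
--         for c in range(w):
--             if row[c] == "@":
--                 pr, pc = r, c * p
--     return ins, ws, bs, pr, pc
-- ===== Notes on version B (the rewrite author's own statement) =====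
-- stated objective: alternative
-- what changed: Replaces A's single branching loop threading a 4-part accumulator (ws, bs, pr, pc) with three independent passes: two flattened comprehensions building walls and boxes directly, and a separate last-wins scan for the player.
import Mathlib
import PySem

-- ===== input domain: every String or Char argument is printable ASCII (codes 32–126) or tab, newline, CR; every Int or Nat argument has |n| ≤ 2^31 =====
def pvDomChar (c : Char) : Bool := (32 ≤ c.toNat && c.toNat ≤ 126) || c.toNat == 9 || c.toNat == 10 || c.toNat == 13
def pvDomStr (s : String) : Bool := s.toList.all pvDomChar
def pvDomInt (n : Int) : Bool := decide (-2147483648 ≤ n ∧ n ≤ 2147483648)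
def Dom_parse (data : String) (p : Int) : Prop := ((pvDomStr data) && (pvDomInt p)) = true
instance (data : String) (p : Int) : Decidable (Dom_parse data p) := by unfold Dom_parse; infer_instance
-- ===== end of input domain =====

-- B replaces A's single branching accumulator loop by three independent passes (two
-- flattened comprehensions for walls and boxes, one last-wins scan for the player);
-- objective: alternative decomposition, not speed.

-- ===== PORT A =====
-- A's state (ws, bs, pr, pc) threaded through the nested for-loops.
def parse (data : String) (p : Int) : String × (List (Int × Int)) × (List (Int × Int)) × Int × Int :=
  let parts := (PySem.Str.split? data "\n\n").getD []
  if parts.length = 2 then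
    let m := parts.getD 0 ""
    let ins := parts.getD 1 ""
    let ms := PySem.Str.splitlines m
    let st := (PySem.List.pyRange 0 (PySem.List.len ms) 1).foldl (fun st r =>
      (PySem.List.pyRange 0 (PySem.Str.len (ms.getD 0 "")) 1).foldl (fun st c =>
        let ch := PySem.Str.pyGet? (PySem.List.pyGetD ms r "") c
        if ch = some '#' then
          let ws := st.1 ++ [(r, c * p)]
          let ws := if p = 2 then ws ++ [(r, c * p + 1)] else ws
          (ws, st.2)
        else if ch = some 'O' then
          (st.1, st.2.1 ++ [(r, c * p)], st.2.2)
        else if ch = some '@' then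
          (st.1, st.2.1, r, c * p)
        else st) st) ([], [], 0, 0)
    (ins, st)
  else ("", [], [], 0, 0)   -- unreachable: Python A raises ValueError here (outside Pre_)

-- ===== PORT B =====
def parse_alt (data : String) (p : Int) : String × (List (Int × Int)) × (List (Int × Int)) × Int × Int :=
  let parts := (PySem.Str.split? data "\n\n").getD []
  if parts.length = 2 then
    let m := parts.getD 0 ""
    let ins := parts.getD 1 ""
    let g := PySem.Str.splitlines m
    let w : Int := if g = [] then 0 else PySem.Str.len (g.getD 0 "")
    let ws := (PySem.List.enumerate g).flatMap (fun rr =>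
      (PySem.List.pyRange 0 w 1).flatMap (fun c =>
        if PySem.Str.pyGet? rr.2 c = some '#' then
          (PySem.List.pyRange 0 (if p = 2 then 2 else 1) 1).map (fun k => (rr.1, c * p + k))
        else []))
    let bs := (PySem.List.enumerate g).flatMap (fun rr =>
      (PySem.List.pyRange 0 w 1).flatMap (fun c =>
        if PySem.Str.pyGet? rr.2 c = some 'O' then [(rr.1, c * p)] else []))
    let pl := (PySem.List.enumerate g).foldl (fun pl rr =>
      (PySem.List.pyRange 0 w 1).foldl (fun pl c =>
        if PySem.Str.pyGet? rr.2 c = some '@' then (rr.1, c * p) else pl) pl) ((0 : Int), (0 : Int))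
    (ins, ws, bs, pl.1, pl.2)
  else ("", [], [], 0, 0)   -- unreachable under Pre_ (B raises there too)

-- ===== PRECONDITION & SPEC =====
-- Pre_ excludes exactly the inputs where Python A raises: data must contain exactly one
-- blank-line separator (else the 2-tuple unpack raises ValueError), and no grid line may
-- be shorter than the first line (else ms[r][c] raises IndexError).
def Pre_parse (data : String) (p : Int) : Prop :=
  ((PySem.Str.split? data "\n\n").getD []).length = 2 ∧
  ∀ row ∈ PySem.Str.splitlines (((PySem.Str.split? data "\n\n").getD []).getD 0 ""),
    ((PySem.Str.splitlines (((PySem.Str.split? data "\n\n").getD []).getD 0 "")).getD 0 "").toList.length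
      ≤ row.toList.length
instance (data : String) (p : Int) : Decidable (Pre_parse data p) := by unfold Pre_parse; infer_instance

def pvWitness_parse : String × Int := ("##\n.O\n@.\n\n<v>", 1)

def Spec_parse (data : String) (p : Int) (out : String × (List (Int × Int)) × (List (Int × Int)) × Int × Int) : Prop := out = parse_alt data p
instance (data : String) (p : Int) (out : String × (List (Int × Int)) × (List (Int × Int)) × Int × Int) : Decidable (Spec_parse data p out) := by unfold Spec_parse; infer_instance

-- ===== CLAIM (what is proved, stated in full; the proofs are below) =====
def Claim_equal_parse : Prop := ∀ (data : String) (p : Int), Dom_parse data p → Pre_parse data p → Spec_parse data p (parse data p)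

-- ===== LEMMAS AND PROOFS =====

-- the cells B's comprehension emits for a '#' at column c are exactly the ones A appends
theorem hash_cells (p r c : Int) :
    (PySem.List.pyRange 0 (if p = 2 then 2 else 1) 1).map (fun k => (r, c * p + k)) =
    if p = 2 then [(r, c * p), (r, c * p + 1)] else [(r, c * p)] := by
  by_cases h : p = 2 <;> simp [h, PySem.List.pyRange_one, List.range_succ]

-- inner loop over one row: A's fold appends the '#'-cells and 'O'-cells and updates the player
theorem inner_eq (p r : Int) (row : String) (cs : List Int)
    (st : List (Int × Int) × List (Int × Int) × Int × Int) :
    cs.foldl (fun st c =>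
        let ch := PySem.Str.pyGet? row c
        if ch = some '#' then
          let ws := st.1 ++ [(r, c * p)]
          let ws := if p = 2 then ws ++ [(r, c * p + 1)] else ws
          (ws, st.2)
        else if ch = some 'O' then
          (st.1, st.2.1 ++ [(r, c * p)], st.2.2)
        else if ch = some '@' then
          (st.1, st.2.1, r, c * p)
        else st) st =
      (st.1 ++ cs.flatMap (fun c =>
          if PySem.Str.pyGet? row c = some '#' then
            (if p = 2 then [(r, c * p), (r, c * p + 1)] else [(r, c * p)])
          else []),
       st.2.1 ++ cs.flatMap (fun c =>
          if PySem.Str.pyGet? row c = some 'O' then [(r, c * p)] else []),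
       cs.foldl (fun pl c =>
          if PySem.Str.pyGet? row c = some '@' then (r, c * p) else pl) st.2.2) := by
  induction cs generalizing st with
  | nil => simp
  | cons c cs ih =>
    rw [List.foldl_cons, ih, List.flatMap_cons, List.flatMap_cons, List.foldl_cons]
    obtain ⟨ws, bs, pl⟩ := st
    by_cases h1 : PySem.List.pyGet? row.toList c = some '#'
    · by_cases h2 : p = 2 <;> simp [PySem.Str.pyGet?, h1, h2, List.append_assoc]
    · by_cases h2 : PySem.List.pyGet? row.toList c = some 'O'
      · simp [PySem.Str.pyGet?, h2, List.append_assoc]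
      · by_cases h3 : PySem.List.pyGet? row.toList c = some '@' <;>
          simp [PySem.Str.pyGet?, h1, h2, h3]

-- outer loop over the row indices
theorem outer_eq (p w : Int) (g : List String) (rs : List Int)
    (st : List (Int × Int) × List (Int × Int) × Int × Int) :
    rs.foldl (fun st r =>
      (PySem.List.pyRange 0 w 1).foldl (fun st c =>
        let ch := PySem.Str.pyGet? (PySem.List.pyGetD g r "") c
        if ch = some '#' then
          let ws := st.1 ++ [(r, c * p)]
          let ws := if p = 2 then ws ++ [(r, c * p + 1)] else ws
          (ws, st.2)
        else if ch = some 'O' then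
          (st.1, st.2.1 ++ [(r, c * p)], st.2.2)
        else if ch = some '@' then
          (st.1, st.2.1, r, c * p)
        else st) st) st =
      (st.1 ++ rs.flatMap (fun r =>
          (PySem.List.pyRange 0 w 1).flatMap (fun c =>
            if PySem.Str.pyGet? (PySem.List.pyGetD g r "") c = some '#' then
              (if p = 2 then [(r, c * p), (r, c * p + 1)] else [(r, c * p)])
            else [])),
       st.2.1 ++ rs.flatMap (fun r =>
          (PySem.List.pyRange 0 w 1).flatMap (fun c =>
            if PySem.Str.pyGet? (PySem.List.pyGetD g r "") c = some 'O' then [(r, c * p)] else [])),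
       rs.foldl (fun pl r =>
          (PySem.List.pyRange 0 w 1).foldl (fun pl c =>
            if PySem.Str.pyGet? (PySem.List.pyGetD g r "") c = some '@' then (r, c * p) else pl) pl)
        st.2.2) := by
  induction rs generalizing st with
  | nil => simp
  | cons r rs ih =>
    rw [List.foldl_cons, inner_eq, ih, List.flatMap_cons, List.flatMap_cons, List.foldl_cons]
    simp [List.append_assoc]

-- ===== VERDICT (by name: the statement is the Claim_ definition above) =====
theorem parse_spec : Claim_equal_parse := by
  intro data p _ hpre
  unfold Spec_parse parse parse_alt
  obtain ⟨h2, _⟩ := hpre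
  rw [if_pos h2, if_pos h2]
  dsimp only
  by_cases hne : PySem.Str.splitlines (((PySem.Str.split? data "\n\n").getD []).getD 0 "") = []
  · rw [hne]
    simp [PySem.List.len, PySem.List.pyRange_one_eq_nil, PySem.List.enumerate]
  · rw [if_neg hne,
      PySem.List.enumerate_eq_map_pyRange
        (PySem.Str.splitlines (((PySem.Str.split? data "\n\n").getD []).getD 0 "")) "",
      List.flatMap_map, List.flatMap_map, List.foldl_map, outer_eq]
    simp only [hash_cells, List.nil_append]
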